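-- pv_equiv track=rewrite | github.com/thuzhangjw/decison_support | ds/decision_support_model.py | generate_feature_dim_list
-- ===== SOURCE A (Python) =====
-- def generate_feature_dim_list(column_names):
--     feature_dim_list = []
--     current_name = column_names[0].split('_')[0]
--     l = 0
--     for name in column_names:
--         tn = name.split('_')[0]
--         if tn == current_name:
--             l += 1
--         else:
--             feature_dim_list.append(l)
--             l = 1
--             current_name = tn
--     feature_dim_list.append(l)
--     assert(len(column_names) == sum(feature_dim_list))
--     return feature_dim_list
-- ===== SOURCE B (Python) =====
-- def _runs(ks):
--     # consecutive run lengths via two-pointer spans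
--     out = []
--     while ks:
--         k = ks[0]
--         n = 1
--         while n < len(ks) and ks[n] == k:
--             n += 1
--         out.append(n)
--         ks = ks[n:]
--     return out
--
--
-- def generate_feature_dim_list(column_names):
--     return _runs([name.split('_')[0] for name in column_names])
-- ===== Notes on version B (the rewrite author's own statement) =====
-- stated objective: simpler
-- what changed: Replaced the current_name/counter/flush accumulator loop with a two-pointer span scan over the precomputed prefix keys (take one run at a time, append its length).
-- crash fix: On the empty list A raises IndexError (it indexes column_names[0] before looping) while B returns []. — e.g. on generate_feature_dim_list([]): A raises IndexError, B returns []
import Mathlib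
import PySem

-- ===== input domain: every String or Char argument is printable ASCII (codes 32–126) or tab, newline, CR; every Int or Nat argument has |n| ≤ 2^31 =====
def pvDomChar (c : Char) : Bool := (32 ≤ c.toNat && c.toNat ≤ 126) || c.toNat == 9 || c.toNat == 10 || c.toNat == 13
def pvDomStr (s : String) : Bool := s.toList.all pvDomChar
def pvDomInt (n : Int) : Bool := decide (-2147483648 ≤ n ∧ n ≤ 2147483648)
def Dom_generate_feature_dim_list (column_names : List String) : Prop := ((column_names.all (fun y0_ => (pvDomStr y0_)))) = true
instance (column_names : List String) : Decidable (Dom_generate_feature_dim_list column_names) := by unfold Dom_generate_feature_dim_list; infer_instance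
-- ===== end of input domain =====

-- B replaces A's current_name/counter/flush accumulator loop with a run-at-a-time span scan over the prefix keys (simpler decomposition, same cost).


-- ===== PORT A =====
def pvKey (s : String) : String :=
  -- name.split('_')[0]; split with a nonempty separator always yields a nonempty list, so [0] is safe
  ((PySem.Str.split? s "_").getD []).headD ""

def pvStepA (st : List Int × String × Int) (name : String) : List Int × String × Int :=
  let tn := pvKey name
  if tn == st.2.1 then (st.1, st.2.1, st.2.2 + 1)
  else (st.1 ++ [st.2.2], tn, 1)

def generate_feature_dim_list (column_names : List String) : List Int :=
  match PySem.List.pyGet? column_names 0 with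
  | none => []  -- IndexError in Python: excluded by Pre_
  | some c0 =>
    let st := column_names.foldl pvStepA ([], pvKey c0, 0)
    st.1 ++ [st.2.2]

-- ===== PORT B =====
def pvRunsB (ks : List String) : List Int :=
  match ks with
  | [] => []
  | k :: rest =>
    ((1 : Int) + (rest.takeWhile (fun x => x == k)).length)
      :: pvRunsB (rest.dropWhile (fun x => x == k))
termination_by ks.length
decreasing_by
  simp only [List.length_cons]
  exact Nat.lt_succ_of_le (List.length_dropWhile_le _ _)

def generate_feature_dim_list_alt (column_names : List String) : List Int :=
  pvRunsB (column_names.map pvKey)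

-- ===== PRECONDITION & SPEC =====
-- Pre_ excludes only the empty list, on which A raises IndexError.
def Pre_generate_feature_dim_list (column_names : List String) : Prop := column_names ≠ []
instance (column_names : List String) : Decidable (Pre_generate_feature_dim_list column_names) := by unfold Pre_generate_feature_dim_list; infer_instance
def pvWitness_generate_feature_dim_list : List String := ["a_1", "a_2", "b"]

-- On the empty list A raises IndexError (it indexes column_names[0] before looping); B returns [].
def Raises_generate_feature_dim_list (column_names : List String) : Prop := column_names = []
instance (column_names : List String) : Decidable (Raises_generate_feature_dim_list column_names) := by unfold Raises_generate_feature_dim_list; infer_instance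
def pvRaiseWitness_generate_feature_dim_list : List String := []
def pvRaiseWitnessOut_generate_feature_dim_list : List Int := []

def Spec_generate_feature_dim_list (column_names : List String) (out : List Int) : Prop := out = generate_feature_dim_list_alt column_names
instance (column_names : List String) (out : List Int) : Decidable (Spec_generate_feature_dim_list column_names out) := by unfold Spec_generate_feature_dim_list; infer_instance

-- ===== CLAIM (what is proved, stated in full; the proofs are below) =====
def Claim_equal_generate_feature_dim_list : Prop := ∀ (column_names : List String), Dom_generate_feature_dim_list column_names → Pre_generate_feature_dim_list column_names → Spec_generate_feature_dim_list column_names (generate_feature_dim_list column_names)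

def Claim_raises_generate_feature_dim_list : Prop := (∀ (column_names : List String), Dom_generate_feature_dim_list column_names → Raises_generate_feature_dim_list column_names → ¬ Pre_generate_feature_dim_list column_names) ∧ (Dom_generate_feature_dim_list (pvRaiseWitness_generate_feature_dim_list) ∧ Raises_generate_feature_dim_list (pvRaiseWitness_generate_feature_dim_list) ∧ generate_feature_dim_list_alt (pvRaiseWitness_generate_feature_dim_list) = pvRaiseWitnessOut_generate_feature_dim_list)

-- ===== LEMMAS AND PROOFS =====

/-- A's loop continued from state (cur, l), as a recursion over the key list. -/
def pvRunsFrom (cur : String) (l : Int) : List String → List Int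
  | [] => [l]
  | k :: ks => if k == cur then pvRunsFrom cur (l + 1) ks else l :: pvRunsFrom k 1 ks

lemma pvFoldA_eq (names : List String) : ∀ (acc : List Int) (cur : String) (l : Int),
    (names.foldl pvStepA (acc, cur, l)).1 ++ [(names.foldl pvStepA (acc, cur, l)).2.2]
      = acc ++ pvRunsFrom cur l (names.map pvKey) := by
  induction names with
  | nil => intro acc cur l; simp [pvRunsFrom]
  | cons n ns ih =>
    intro acc cur l
    simp only [List.foldl_cons, List.map_cons, pvStepA, pvRunsFrom]
    by_cases h : pvKey n == cur
    · simp [h, ih]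
    · simp [h, ih, List.append_assoc]

lemma pvRunsB_cons (k : String) (ks : List String) :
    pvRunsB (k :: ks)
      = ((1 : Int) + (ks.takeWhile (fun x => x == k)).length)
          :: pvRunsB (ks.dropWhile (fun x => x == k)) := by
  rw [pvRunsB]

lemma pvRunsFrom_eq (ks : List String) : ∀ (cur : String) (l : Int),
    pvRunsFrom cur l ks
      = (l + ((ks.takeWhile (fun x => x == cur)).length : Int))
          :: pvRunsB (ks.dropWhile (fun x => x == cur)) := by
  induction ks with
  | nil => intro cur l; simp [pvRunsFrom, pvRunsB]
  | cons k ks ih =>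
    intro cur l
    by_cases h : k == cur
    · simp only [pvRunsFrom, List.takeWhile_cons, List.dropWhile_cons, h, if_true, ih]
      simp; ring_nf
    · simp [pvRunsFrom, h, ih, pvRunsB_cons]

-- ===== VERDICT (by name: the statement is the Claim_ definition above) =====
theorem generate_feature_dim_list_spec : Claim_equal_generate_feature_dim_list := by
  intro column_names _ hpre
  unfold Spec_generate_feature_dim_list generate_feature_dim_list generate_feature_dim_list_alt
  match column_names, hpre with
  | c :: cs, _ =>
    simp only [PySem.List.pyGet?, PySem.List.pyIdx?]
    norm_num
    rw [pvFoldA_eq, pvRunsFrom_eq, pvRunsB_cons]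
    simp [pvStepA]

theorem generate_feature_dim_list_raises : Claim_raises_generate_feature_dim_list := by
  unfold Claim_raises_generate_feature_dim_list
  refine ⟨fun c _ h hp => hp h, by decide, by decide, ?_⟩
  show pvRunsB (List.map pvKey []) = _
  rw [List.map_nil, pvRunsB]
  rfl

-- self-check: the raise witness lies in Dom and in Raises_ (uses the theorem above)
theorem pvRaiseWitness_ok : Dom_generate_feature_dim_list pvRaiseWitness_generate_feature_dim_list ∧ Raises_generate_feature_dim_list pvRaiseWitness_generate_feature_dim_list := by
  have h := generate_feature_dim_list_raises
  unfold Claim_raises_generate_feature_dim_list at h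
  exact ⟨h.2.1, h.2.2.1⟩
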